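-- pv_equiv track=rewrite | github.com/quic/efficient-transformers | QEfficient/utils/check_ccl_specializations.py | build_doubling_set
-- ===== SOURCE A (Python) =====
-- from typing import List, Optional, Set, Tuple
--
-- def build_doubling_set(start: int, limit: int, max_elements: int) -> Set[int]:
--     """
--     Build a STRICT doubling set: {start, start*2, start*4, ...} up to 'limit',
--     collecting at most 'max_elements' values. Returns a set; caller will sort.
--     """
--     values: Set[int] = set()
--     if max_elements <= 0 or start <= 0 or limit <= 0:
--         return values
--
--     v = start
--     while v <= limit and len(values) < max_elements:
--         values.add(v)
--         v *= 2
--     return values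
-- ===== SOURCE B (Python) =====
-- def build_doubling_set(start: int, limit: int, max_elements: int) -> set:
--     if max_elements <= 0 or start <= 0 or limit <= 0:
--         return set()
--     n = min(max_elements, (limit // start).bit_length())
--     return {start << k for k in range(n)}
-- ===== Notes on version B (the rewrite author's own statement) =====
-- stated objective: simpler
-- what changed: Replaces the doubling while-loop with a closed form: the number of in-range doublings is (limit//start).bit_length(), capped by max_elements, and the set is built by one comprehension start << k.
import Mathlib
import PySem

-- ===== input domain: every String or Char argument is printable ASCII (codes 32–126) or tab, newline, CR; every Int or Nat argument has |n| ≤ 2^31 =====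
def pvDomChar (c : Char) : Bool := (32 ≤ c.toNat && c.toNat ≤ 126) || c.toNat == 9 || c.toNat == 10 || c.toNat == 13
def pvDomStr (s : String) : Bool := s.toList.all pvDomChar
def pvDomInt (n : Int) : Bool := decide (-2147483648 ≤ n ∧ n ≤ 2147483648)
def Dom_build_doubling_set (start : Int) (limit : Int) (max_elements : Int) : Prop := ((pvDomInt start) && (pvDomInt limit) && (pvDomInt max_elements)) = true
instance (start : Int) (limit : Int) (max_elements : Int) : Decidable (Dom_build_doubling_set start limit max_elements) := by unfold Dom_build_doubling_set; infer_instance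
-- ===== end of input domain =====

-- B replaces A's doubling while-loop by the closed form min(max_elements, (limit//start).bit_length()) and a single comprehension (simpler).


-- ===== PORT A =====
-- the while loop: 'while v <= limit and len(values) < max_elements: values.add(v); v *= 2'
-- (carries the invariant 0 < v, established by A's guard 'start <= 0', for termination)
def pvLoopA (limit max_elements : Int) (values : List Int) (v : Int) (hv : 0 < v) : List Int :=
  if h : v ≤ limit ∧ (values.length : Int) < max_elements then
    pvLoopA limit max_elements (PySem.Set.add values v) (v * 2) (by omega)
  else values
termination_by (limit - v + 1).toNat
decreasing_by obtain ⟨h1, -⟩ := h; omega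

def build_doubling_set (start : Int) (limit : Int) (max_elements : Int) : List Int :=
  if h : max_elements ≤ 0 ∨ start ≤ 0 ∨ limit ≤ 0 then []
  else pvLoopA limit max_elements [] start (by omega)

-- ===== PORT B =====
-- q.bit_length() for q ≥ 0
def pvBitLen : Nat → Nat
  | 0 => 0
  | n + 1 => pvBitLen ((n + 1) / 2) + 1
decreasing_by omega

def build_doubling_set_alt (start : Int) (limit : Int) (max_elements : Int) : List Int :=
  if max_elements ≤ 0 ∨ start ≤ 0 ∨ limit ≤ 0 then []
  else
    let n := min max_elements ((pvBitLen (limit.fdiv start).toNat : Nat) : Int)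
    (List.range n.toNat).map (fun k => start * 2 ^ k)

-- ===== PRECONDITION & SPEC =====
def Spec_build_doubling_set (start : Int) (limit : Int) (max_elements : Int) (out : List Int) : Prop := out = build_doubling_set_alt start limit max_elements
instance (start : Int) (limit : Int) (max_elements : Int) (out : List Int) : Decidable (Spec_build_doubling_set start limit max_elements out) := by unfold Spec_build_doubling_set; infer_instance

-- ===== CLAIM (what is proved, stated in full; the proofs are below) =====
def Claim_equal_build_doubling_set : Prop := ∀ (start : Int) (limit : Int) (max_elements : Int), Dom_build_doubling_set start limit max_elements → Spec_build_doubling_set start limit max_elements (build_doubling_set start limit max_elements)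

-- ===== LEMMAS AND PROOFS =====

theorem pv_fdiv_two_toNat (q : Int) : (q.fdiv 2).toNat = q.toNat / 2 := by
  have h : q.fdiv 2 = q / 2 := by
    rw [Int.fdiv_eq_ediv]; simp
  omega

theorem pv_loop_eq (limit max_elements v : Int) (hv : 0 < v) (values : List Int)
    (hlt : ∀ x ∈ values, x < v) :
    pvLoopA limit max_elements values v hv =
      values ++ (List.range (min ((max_elements - values.length).toNat)
          (pvBitLen (limit.fdiv v).toNat))).map (fun k => v * 2 ^ k) := by
  induction values, v, hv using pvLoopA.induct limit max_elements with
  | case1 values v hv h ih =>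
    rw [pvLoopA, dif_pos h]
    have hvnot : v ∉ values := fun hm => absurd (hlt v hm) (lt_irrefl v)
    have hadd : PySem.Set.add values v = values ++ [v] := by
      simp [PySem.Set.add, PySem.Set.contains]
      intro hc; exact absurd hc hvnot
    have hq1 : 1 ≤ limit.fdiv v := by
      have : limit.fdiv v = limit / v := by
        rw [Int.fdiv_eq_ediv]; simp; intro h'; omega
      rw [this, Int.le_ediv_iff_mul_le hv]; omega
    have hqhalf : limit.fdiv (v * 2) = (limit.fdiv v).fdiv 2 := by
      rw [Int.fdiv_fdiv_eq_fdiv_mul limit (by omega) (by omega)]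
    -- bit length peels one step
    obtain ⟨m, hm⟩ : ∃ m, (limit.fdiv v).toNat = m + 1 := ⟨(limit.fdiv v).toNat - 1, by omega⟩
    have hbl : pvBitLen (limit.fdiv v).toNat = pvBitLen ((limit.fdiv (v * 2)).toNat) + 1 := by
      rw [hm, pvBitLen, hqhalf, pv_fdiv_two_toNat, hm]
    have hlt2 : ∀ x ∈ PySem.Set.add values v, x < v * 2 := by
      rw [hadd]; intro x hx
      rcases List.mem_append.1 hx with h' | h'
      · exact lt_trans (hlt x h') (by omega)
      · simp at h'; omega
    rw [ih hlt2]
    rw [hadd, hbl]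
    simp only [List.length_append, List.length_cons, List.length_nil, Nat.cast_add,
      Nat.cast_one, Nat.cast_zero, List.append_assoc, List.cons_append, List.nil_append]
    have key : min ((max_elements - (values.length : Int)).toNat)
        (pvBitLen ((limit.fdiv (v * 2)).toNat) + 1)
        = min ((max_elements - ((values.length : Int) + 1)).toNat)
            (pvBitLen ((limit.fdiv (v * 2)).toNat)) + 1 := by
      have := h.2; omega
    rw [key, List.range_succ_eq_map, List.map_cons, List.map_map]
    simp only [pow_zero, mul_one, zero_add]
    congr 1
    congr 1
    apply List.map_congr_left
    intro k _
    simp only [Function.comp_apply, pow_succ]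
    ring
  | case2 values v hv h =>
    rw [pvLoopA, dif_neg h]
    rcases not_and_or.1 h with h' | h'
    · have hq : limit.fdiv v ≤ 0 := by
        have : limit.fdiv v = limit / v := by
          rw [Int.fdiv_eq_ediv]; simp; intro h''; omega
        rw [this]
        have := (Int.ediv_lt_iff_lt_mul hv (a := limit) (b := 1)).2 (by omega)
        omega
      have : (limit.fdiv v).toNat = 0 := by omega
      rw [this]
      simp [pvBitLen]
    · have : (max_elements - values.length).toNat = 0 := by omega
      rw [this]
      simp

-- ===== VERDICT (by name: the statement is the Claim_ definition above) =====
theorem build_doubling_set_spec : Claim_equal_build_doubling_set := by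
  intro start limit max_elements _
  unfold Spec_build_doubling_set build_doubling_set build_doubling_set_alt
  split_ifs with h
  · rfl
  · push Not at h
    rw [pv_loop_eq limit max_elements start (by omega) [] (by simp)]
    simp only [List.nil_append, List.length_nil, Int.natCast_zero, sub_zero]
    congr 2
    omega
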